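-- pv_equiv track=rewrite | github.com/roman-strilets/beam-node-sync | src/syncer.py | _iter_contiguous_height_ranges
-- ===== SOURCE A (Python) =====
-- from collections.abc import Iterable, Iterator, Sequence
--
-- def _iter_contiguous_height_ranges(
--     heights: Iterable[int],
--     batch_size: int,
-- ) -> Iterator[tuple[int, int]]:
--     """Yield contiguous height ranges capped at ``batch_size`` items each."""
--     if batch_size <= 0:
--         raise ValueError(f"batch_size must be > 0, got {batch_size}")
--
--     start_height: int | None = None
--     previous_height: int | None = None
--     count = 0
--
--     for height in heights:
--         if start_height is None:
--             start_height = height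
--             previous_height = height
--             count = 1
--             continue
--
--         assert previous_height is not None
--         if height != previous_height + 1 or count >= batch_size:
--             yield start_height, previous_height
--             start_height = height
--             previous_height = height
--             count = 1
--             continue
--
--         previous_height = height
--         count += 1
--
--     if start_height is not None:
--         assert previous_height is not None
--         yield start_height, previous_height
-- ===== SOURCE B (Python) =====
-- def _iter_contiguous_height_ranges(heights, batch_size):
--     """Yield contiguous height ranges capped at ``batch_size`` items each.
--
--     Two-phase decomposition: first compress the heights into maximal
--     contiguous runs (start, end); then cut each run into batch-capped
--     sub-ranges arithmetically.
--     """
--     if batch_size <= 0: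
--         raise ValueError(f"batch_size must be > 0, got {batch_size}")
--
--     runs = []
--     for h in heights:
--         if runs and h == runs[-1][1] + 1:
--             runs[-1][1] = h
--         else:
--             runs.append([h, h])
--
--     for start, end in runs:
--         lo = start
--         while lo <= end:
--             hi = min(lo + batch_size - 1, end)
--             yield lo, hi
--             lo = hi + 1
-- ===== Notes on version B (the rewrite author's own statement) =====
-- stated objective: alternative
-- what changed: B replaces A's single state machine (interleaving run detection with a batch counter) by two phases: one pass compressing heights into maximal contiguous (start,end) runs, then cutting each run into batch-capped sub-ranges arithmetically with min(lo+batch_size-1,end).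
import Mathlib
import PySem

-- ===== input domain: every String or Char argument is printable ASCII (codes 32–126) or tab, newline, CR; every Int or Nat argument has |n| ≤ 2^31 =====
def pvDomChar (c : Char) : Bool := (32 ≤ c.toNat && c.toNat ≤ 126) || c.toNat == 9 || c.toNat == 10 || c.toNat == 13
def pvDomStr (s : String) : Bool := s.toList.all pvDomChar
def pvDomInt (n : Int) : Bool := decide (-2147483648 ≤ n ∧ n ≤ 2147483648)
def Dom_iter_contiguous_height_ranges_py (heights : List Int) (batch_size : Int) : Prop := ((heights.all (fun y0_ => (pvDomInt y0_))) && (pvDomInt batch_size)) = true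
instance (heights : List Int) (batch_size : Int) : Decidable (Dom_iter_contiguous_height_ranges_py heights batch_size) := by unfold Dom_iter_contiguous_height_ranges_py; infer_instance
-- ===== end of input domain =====

-- B splits the work into run-compression followed by arithmetic batch cutting,
-- instead of A's single state machine; same O(n) cost, different decomposition.
-- Both Pythons are generators; equality is about the list of yielded pairs.

-- ===== PORT A =====
-- the for-loop's state: (start_height, previous_height, count); yields become cons
def pvALoop (batch : Int) : List Int → Option Int → Option Int → Int → List (Int × Int)
  | [], sOpt, pOpt, _ =>
    match sOpt, pOpt with
    | some s, some p => [(s, p)]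
    | _, _ => []
  | h :: t, sOpt, pOpt, count =>
    match sOpt, pOpt with
    | none, _ => pvALoop batch t (some h) (some h) 1
    | some s, some p =>
      if h ≠ p + 1 ∨ count ≥ batch then
        (s, p) :: pvALoop batch t (some h) (some h) 1
      else
        pvALoop batch t (some s) (some h) (count + 1)
    | some _, none => []  -- unreachable (prev is set whenever start is)

def iter_contiguous_height_ranges_py (heights : List Int) (batch_size : Int) : List (Int × Int) :=
  if batch_size ≤ 0 then []  -- Python raises ValueError here; excluded by Pre_
  else pvALoop batch_size heights none none 0

-- ===== PORT B =====
-- run-compression loop: state is the current run's (start, end); finished runs are cons'd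
def pvRunsGo (s e : Int) : List Int → List (Int × Int)
  | [] => [(s, e)]
  | h :: t => if h = e + 1 then pvRunsGo s h t else (s, e) :: pvRunsGo h h t

-- the per-run while loop of B (the `lo ≤ e ∧ 1 ≤ batch` guard only makes it total)
def pvChunkRun (batch lo e : Int) : List (Int × Int) :=
  if h : lo ≤ e ∧ 1 ≤ batch then
    (lo, min (lo + batch - 1) e) :: pvChunkRun batch (min (lo + batch - 1) e + 1) e
  else []
termination_by (e + 1 - lo).toNat
decreasing_by omega

def iter_contiguous_height_ranges_py_alt (heights : List Int) (batch_size : Int) : List (Int × Int) :=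
  if batch_size ≤ 0 then []  -- Python raises ValueError here; excluded by Pre_
  else
    (match heights with
     | [] => []
     | h :: t => pvRunsGo h h t).flatMap (fun (r : Int × Int) => pvChunkRun batch_size r.1 r.2)

-- ===== PRECONDITION & SPEC =====
-- Pre_ excludes exactly batch_size ≤ 0, where the Python A raises ValueError.
def Pre_iter_contiguous_height_ranges_py (heights : List Int) (batch_size : Int) : Prop :=
  0 < batch_size
instance (heights : List Int) (batch_size : Int) : Decidable (Pre_iter_contiguous_height_ranges_py heights batch_size) := by unfold Pre_iter_contiguous_height_ranges_py; infer_instance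

def pvWitness_iter_contiguous_height_ranges_py : List Int × Int := ([1, 2, 3, 10, 11], 2)

def Spec_iter_contiguous_height_ranges_py (heights : List Int) (batch_size : Int) (out : List (Int × Int)) : Prop := out = iter_contiguous_height_ranges_py_alt heights batch_size
instance (heights : List Int) (batch_size : Int) (out : List (Int × Int)) : Decidable (Spec_iter_contiguous_height_ranges_py heights batch_size out) := by unfold Spec_iter_contiguous_height_ranges_py; infer_instance

-- ===== CLAIM (what is proved, stated in full; the proofs are below) =====
def Claim_equal_iter_contiguous_height_ranges_py : Prop := ∀ (heights : List Int) (batch_size : Int), Dom_iter_contiguous_height_ranges_py heights batch_size → Pre_iter_contiguous_height_ranges_py heights batch_size → Spec_iter_contiguous_height_ranges_py heights batch_size (iter_contiguous_height_ranges_py heights batch_size)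

-- ===== LEMMAS AND PROOFS =====

-- the first run produced by pvRunsGo has the carried start, an end ≥ e, and a tail
-- independent of the carried start
lemma pvRunsGo_shape : ∀ (t : List Int) (e : Int), ∃ E rest, e ≤ E ∧
    ∀ s, pvRunsGo s e t = (s, E) :: rest := by
  intro t
  induction t with
  | nil => intro e; exact ⟨e, [], le_refl e, fun s => rfl⟩
  | cons h t ih =>
    intro e
    by_cases hh : h = e + 1
    · subst hh
      obtain ⟨E, rest, hle, heq⟩ := ih (e + 1)
      exact ⟨E, rest, by omega, fun s => by rw [show pvRunsGo s e ((e+1) :: t) = pvRunsGo s (e+1) t from by simp [pvRunsGo]]; exact heq s⟩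
    · exact ⟨e, pvRunsGo h h t, le_refl e, fun s => by simp [pvRunsGo, hh]⟩

-- a run that fits in one batch is one chunk
lemma pvChunkRun_small (b s e : Int) (hb : 1 ≤ b) (hs : s ≤ e) (hc : e - s + 1 ≤ b) :
    pvChunkRun b s e = [(s, e)] := by
  have hm : min (s + b - 1) e = e := by omega
  rw [pvChunkRun, dif_pos ⟨hs, hb⟩, hm, pvChunkRun, dif_neg (by omega)]

-- peeling one full batch off the front of a run
lemma pvChunkRun_split (b s E : Int) (hb : 1 ≤ b) (hE : s + b ≤ E) :
    pvChunkRun b s E = (s, s + b - 1) :: pvChunkRun b (s + b) E := by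
  have hm : min (s + b - 1) E = s + b - 1 := by omega
  have h1 : s + b - 1 + 1 = s + b := by ring
  rw [pvChunkRun, dif_pos ⟨by omega, hb⟩, hm, h1]

-- main invariant: mid-run, A's chunk state (start s, prev e, count = e-s+1) produces
-- exactly the batch-cut runs of the remaining input grown from (s, e)
lemma pvMain (b : Int) (hb : 1 ≤ b) : ∀ (t : List Int) (s e : Int), s ≤ e → e - s + 1 ≤ b →
    pvALoop b t (some s) (some e) (e - s + 1) =
      (pvRunsGo s e t).flatMap (fun r => pvChunkRun b r.1 r.2) := by
  intro t
  induction t with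
  | nil =>
    intro s e hs hc
    simp [pvALoop, pvRunsGo, pvChunkRun_small b s e hb hs hc]
  | cons h t ih =>
    intro s e hs hc
    by_cases hh : h = e + 1
    · subst hh
      by_cases hcnt : e - s + 1 ≥ b
      · -- chunk full: A emits (s,e) and restarts at e+1; on B's side the run continues,
        -- but its batch cutting splits at exactly the same point
        have hA : pvALoop b ((e + 1) :: t) (some s) (some e) (e - s + 1) =
            (s, e) :: pvALoop b t (some (e + 1)) (some (e + 1)) 1 := by
          simp [pvALoop, hcnt]
        obtain ⟨E, rest, hle, hrun⟩ := pvRunsGo_shape t (e + 1)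
        have ihh := ih (e + 1) (e + 1) (le_refl _) (by omega)
        rw [show ((e + 1) - (e + 1) + 1 : Int) = 1 from by ring] at ihh
        rw [hA, ihh, hrun (e + 1)]
        have hRB : pvRunsGo s e ((e + 1) :: t) = (s, E) :: rest := by
          simp [pvRunsGo, hrun s]
        rw [hRB]
        simp only [List.flatMap_cons]
        rw [pvChunkRun_split b s E hb (by omega)]
        have h2 : s + b = e + 1 := by omega
        rw [h2, show (e + 1 - 1 : Int) = e from by ring, List.cons_append]
      · -- run and chunk both continue
        have hA : pvALoop b ((e + 1) :: t) (some s) (some e) (e - s + 1) =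
            pvALoop b t (some s) (some (e + 1)) (e - s + 1 + 1) := by
          simp [pvALoop, hcnt]
        have h2 : e - s + 1 + 1 = (e + 1) - s + 1 := by ring
        have hRB : pvRunsGo s e ((e + 1) :: t) = pvRunsGo s (e + 1) t := by
          simp [pvRunsGo]
        rw [hA, h2, hRB, ih s (e + 1) (by omega) (by omega)]
    · -- gap: A emits (s,e); B closes the run (one chunk, since count ≤ b)
      have hA : pvALoop b (h :: t) (some s) (some e) (e - s + 1) =
          (s, e) :: pvALoop b t (some h) (some h) 1 := by
        simp [pvALoop, hh]
      have hRB : pvRunsGo s e (h :: t) = (s, e) :: pvRunsGo h h t := by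
        simp [pvRunsGo, hh]
      have ihh := ih h h (le_refl h) (by omega)
      rw [show (h - h + 1 : Int) = 1 from by ring] at ihh
      rw [hA, hRB, ihh]
      simp [pvChunkRun_small b s e hb hs hc]

-- ===== VERDICT (by name: the statement is the Claim_ definition above) =====
theorem iter_contiguous_height_ranges_py_spec : Claim_equal_iter_contiguous_height_ranges_py := by
  intro heights batch_size _ hpre
  unfold Spec_iter_contiguous_height_ranges_py
  unfold Pre_iter_contiguous_height_ranges_py at hpre
  unfold iter_contiguous_height_ranges_py iter_contiguous_height_ranges_py_alt
  rw [if_neg (by omega), if_neg (by omega)]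
  cases heights with
  | nil => simp [pvALoop]
  | cons h t =>
    have h0 : pvALoop batch_size (h :: t) none none 0 =
        pvALoop batch_size t (some h) (some h) 1 := by simp [pvALoop]
    have hm := pvMain batch_size (by omega) t h h (le_refl h) (by omega)
    rw [show (h - h + 1 : Int) = 1 from by ring] at hm
    rw [h0, hm]
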